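-- pv_equiv track=rewrite | github.com/bz226/elle_codes | python_jax_model/elle_jax_model/mesh.py | _cycle_with_pattern
-- ===== SOURCE A (Python) =====
-- def _cycle_with_pattern(node_ids: list[int], pattern: list[int]) -> list[int] | None:
--     count = len(node_ids)
--     pattern_length = len(pattern)
--     for source in ([int(entry) for entry in node_ids], [int(entry) for entry in reversed(node_ids)]):
--         for index in range(count):
--             rotated = source[index:] + source[:index]
--             if rotated[:pattern_length] == pattern:
--                 return rotated
--     return None
-- ===== SOURCE B (Python) =====
-- def _search(source, pattern):
--     # candidate-elimination: keep the set of rotation starts still compatible,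
--     # narrowing it once per pattern position (column-wise), instead of testing
--     # each rotation's whole prefix.
--     n = len(source)
--     doubled = source + source
--     candidates = list(range(n))
--     for j, p in enumerate(pattern):
--         candidates = [i for i in candidates if doubled[i + j] == p]
--         if not candidates:
--             return None
--     if not candidates:
--         return None
--     start = candidates[0]
--     return doubled[start:start + n]
--
--
-- def _cycle_with_pattern(node_ids: list[int], pattern: list[int]) -> list[int] | None:
--     ints = [int(entry) for entry in node_ids]
--     if len(pattern) > len(ints):
--         return None
--     found = _search(ints, pattern)
--     if found is not None:
--         return found
--     return _search(ints[::-1], pattern)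
-- ===== Notes on version B (the rewrite author's own statement) =====
-- stated objective: faster
-- what changed: B replaces A's rotation-by-rotation scan (build each rotation slice, compare its prefix) with candidate elimination: it keeps the set of rotation start positions still compatible and narrows it once per pattern position over a doubled list, slicing out the surviving rotation once; over-long patterns are rejected up front.
import Mathlib
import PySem

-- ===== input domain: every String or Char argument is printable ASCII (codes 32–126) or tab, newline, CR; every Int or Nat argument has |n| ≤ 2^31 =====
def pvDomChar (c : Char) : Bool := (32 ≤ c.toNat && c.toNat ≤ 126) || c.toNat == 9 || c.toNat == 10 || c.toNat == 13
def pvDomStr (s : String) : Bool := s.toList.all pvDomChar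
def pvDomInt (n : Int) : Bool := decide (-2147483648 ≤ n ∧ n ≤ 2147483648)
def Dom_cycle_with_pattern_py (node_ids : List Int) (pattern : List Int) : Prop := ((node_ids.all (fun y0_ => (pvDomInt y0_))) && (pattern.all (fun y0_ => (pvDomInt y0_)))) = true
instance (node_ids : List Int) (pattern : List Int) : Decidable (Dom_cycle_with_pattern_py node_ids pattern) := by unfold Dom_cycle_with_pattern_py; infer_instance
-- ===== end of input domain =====

-- B replaces A's per-rotation prefix scan by candidate elimination: one filtering pass of the
-- surviving rotation-start set per pattern position over the doubled list; same return value.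

-- ===== PORT A =====
-- inner 'for index in range(count)' loop of A, over the remaining index list
def aLoop (source pattern : List Int) : List Nat → Option (List Int)
  | [] => none
  | index :: rest =>
    let rotated := PySem.List.slice source (some (index : Int)) none ++
                   PySem.List.slice source none (some (index : Int))
    if PySem.List.slice rotated none (some (pattern.length : Int)) = pattern then some rotated
    else aLoop source pattern rest

def cycle_with_pattern_py (node_ids : List Int) (pattern : List Int) : Option (List Int) :=
  let count := node_ids.length
  -- outer loop over the two-element tuple of sources, unrolled
  match aLoop (node_ids.map (fun entry => entry)) pattern (List.range count) with
  | some r => some r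
  | none => aLoop (node_ids.reverse.map (fun entry => entry)) pattern (List.range count)

-- ===== PORT B =====
-- the 'for j, p in enumerate(pattern)' loop of _search: narrow the candidate set once per
-- pattern column, early exit when it empties (all indices i + j are in bounds in B's calls)
def bFilter (doubled : List Int) (cands : List Nat) (j : Nat) : List Int → Option (List Nat)
  | [] => some cands
  | p :: ps =>
    let cands' := cands.filter (fun i => doubled.getD (i + j) 0 == p)
    if cands' = [] then none else bFilter doubled cands' (j + 1) ps

-- _search: first surviving candidate, result sliced out of the doubled list once
def bSearch (source pattern : List Int) : Option (List Int) :=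
  match bFilter (source ++ source) (List.range source.length) 0 pattern with
  | none => none
  | some [] => none
  | some (start :: _) =>
      some (PySem.List.slice (source ++ source) (some (start : Int))
              (some ((start : Int) + (source.length : Int))))

def cycle_with_pattern_py_alt (node_ids : List Int) (pattern : List Int) : Option (List Int) :=
  let ints := node_ids.map (fun entry => entry)
  if pattern.length > ints.length then none
  else
    match bSearch ints pattern with
    | some r => some r
    | none => bSearch ints.reverse pattern

-- ===== PRECONDITION & SPEC =====
def Spec_cycle_with_pattern_py (node_ids : List Int) (pattern : List Int) (out : Option (List Int)) : Prop := out = cycle_with_pattern_py_alt node_ids pattern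
instance (node_ids : List Int) (pattern : List Int) (out : Option (List Int)) : Decidable (Spec_cycle_with_pattern_py node_ids pattern out) := by unfold Spec_cycle_with_pattern_py; infer_instance

-- ===== CLAIM (what is proved, stated in full; the proofs are below) =====
def Claim_equal_cycle_with_pattern_py : Prop := ∀ (node_ids : List Int) (pattern : List Int), Dom_cycle_with_pattern_py node_ids pattern → Spec_cycle_with_pattern_py node_ids pattern (cycle_with_pattern_py node_ids pattern)

-- ===== LEMMAS AND PROOFS =====

-- spec-level predicate: the remaining pattern ps matches the doubled list starting at offset i + j
def pmatch (d : List Int) (j : Nat) : List Int → Nat → Bool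
  | [], _ => true
  | p :: ps, i => (d.getD (i + j) 0 == p) && pmatch d (j + 1) ps i

-- elementwise form of pmatch
def matchAt (d p : List Int) (i : Nat) : Bool :=
  (List.range p.length).all fun j => d.getD (i + j) 0 == p.getD j 0

theorem pmatch_eq (d : List Int) (ps : List Int) : ∀ (j i : Nat),
    pmatch d j ps i = (List.range ps.length).all (fun k => d.getD (i + j + k) 0 == ps.getD k 0) := by
  induction ps with
  | nil => intro j i; simp [pmatch]
  | cons p ps ih =>
    intro j i
    rw [pmatch, ih (j + 1) i]
    simp only [List.length_cons, List.range_succ_eq_map, List.all_cons, List.all_map,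
      Function.comp_def]
    congr 1
    refine List.all_congr rfl (fun k => ?_)
    have h1 : i + j + (k + 1) = i + (j + 1) + k := by omega
    simp [h1]

theorem matchAt_eq_pmatch (d p : List Int) (i : Nat) : matchAt d p i = pmatch d 0 p i := by
  rw [matchAt, pmatch_eq]
  simp

-- bFilter returns the candidates surviving all columns, or none only when that set is empty
theorem bFilter_spec (d : List Int) (ps : List Int) : ∀ (cands : List Nat) (j : Nat),
    (bFilter d cands j ps = none ∧ cands.filter (fun i => pmatch d j ps i) = []) ∨
    bFilter d cands j ps = some (cands.filter (fun i => pmatch d j ps i)) := by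
  induction ps with
  | nil => intro cands j; right; simp [bFilter, pmatch]
  | cons p ps ih =>
    intro cands j
    simp only [bFilter]
    by_cases h : cands.filter (fun i => d.getD (i + j) 0 == p) = []
    · left
      rw [if_pos h]
      refine ⟨rfl, ?_⟩
      rw [List.filter_eq_nil_iff] at h ⊢
      intro i hi
      have := h i hi
      simp only [pmatch, Bool.and_eq_true, not_and]
      intro hc
      exact absurd hc this
    · rw [if_neg h]
      have := ih (cands.filter (fun i => d.getD (i + j) 0 == p)) (j + 1)
      rw [List.filter_filter] at this
      have heq : ∀ i : Nat, (pmatch d (j + 1) ps i && (d.getD (i + j) 0 == p))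
          = pmatch d j (p :: ps) i := by
        intro i; rw [pmatch, Bool.and_comm]
      simp only [heq] at this
      exact this

-- find? is the head of filter
theorem find?_eq_head?_filter (P : Nat → Bool) (l : List Nat) :
    l.find? P = (l.filter P).head? := by
  induction l with
  | nil => rfl
  | cons x xs ih =>
    rw [List.find?_cons, List.filter_cons]
    by_cases h : P x = true
    · rw [h]; rfl
    · simp only [Bool.not_eq_true] at h
      rw [h, ih]; rfl

-- the rotation A builds at index i equals the window B cuts out of the doubled list
theorem rot_eq_window (s : List Int) (i : Nat) (hi : i ≤ s.length) :
    ((s ++ s).drop i).take s.length = s.drop i ++ s.take i := by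
  rw [List.drop_append, Nat.sub_eq_zero_of_le hi, List.drop_zero,
      List.take_append]
  rw [List.take_of_length_le (by simp)]
  congr 1
  simp [Nat.sub_sub_self hi]

-- A's prefix test at index i agrees with the elementwise test on the doubled list
theorem match_iff (s p : List Int) (i : Nat) (hi : i < s.length) (hm : p.length ≤ s.length) :
    ((s.drop i ++ s.take i).take p.length = p) ↔ matchAt (s ++ s) p i = true := by
  rw [← rot_eq_window s i (le_of_lt hi), List.take_take, Nat.min_eq_left hm]
  simp only [matchAt, List.all_eq_true, List.mem_range, beq_iff_eq]
  have hlen : ((((s ++ s)).drop i).take p.length).length = p.length := by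
    simp; omega
  constructor
  · intro h j hj
    have hb : i + j < (s ++ s).length := by simp; omega
    have hj2 : j < (((s ++ s).drop i).take p.length).length := by rw [hlen]; exact hj
    have hv := List.getElem_of_eq h hj2
    simp only [List.getElem_take, List.getElem_drop] at hv
    rw [List.getD_eq_getElem _ _ hb, List.getD_eq_getElem _ _ hj, ← hv]
  · intro h
    apply List.ext_getElem hlen
    intro j h1 h2
    have hj : j < p.length := h2
    have hb : i + j < (s ++ s).length := by simp; omega
    have := h j hj
    rw [List.getD_eq_getElem _ _ hb, List.getD_eq_getElem _ _ hj] at this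
    simpa [List.getElem_take, List.getElem_drop] using this

-- when the pattern is longer than the list, A's test never fires
theorem aLoop_none_of_long (s p : List Int) (hm : s.length < p.length) (l : List Nat)
    (hl : ∀ i ∈ l, i < s.length) : aLoop s p l = none := by
  induction l with
  | nil => rfl
  | cons i rest ih =>
    have hi : i < s.length := hl i (by simp)
    simp only [aLoop, PySem.List.slice_from_natCast, PySem.List.slice_to_natCast]
    rw [if_neg]
    · exact ih (fun j hj => hl j (by simp [hj]))
    · intro hcontra
      have := congrArg List.length hcontra
      simp at this
      omega

-- per-source loop equivalence against the first match of the elementwise predicate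
theorem aLoop_eq_find (s p : List Int) (hm : p.length ≤ s.length) (l : List Nat)
    (hl : ∀ i ∈ l, i < s.length) :
    aLoop s p l = (l.find? (fun i => matchAt (s ++ s) p i)).map
      (fun i => s.drop i ++ s.take i) := by
  induction l with
  | nil => rfl
  | cons i rest ih =>
    have hi : i < s.length := hl i (by simp)
    simp only [aLoop, PySem.List.slice_from_natCast, PySem.List.slice_to_natCast,
      List.find?_cons]
    by_cases h : matchAt (s ++ s) p i = true
    · rw [if_pos ((match_iff s p i hi hm).mpr h), h]
      rfl
    · rw [if_neg (fun hc => h ((match_iff s p i hi hm).mp hc))]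
      rw [ih (fun j hj => hl j (by simp [hj]))]
      simp only [Bool.not_eq_true] at h
      rw [h]

-- per-source loop equivalence
theorem aLoop_eq_bSearch (s p : List Int) (hm : p.length ≤ s.length) :
    aLoop s p (List.range s.length) = bSearch s p := by
  have hmain : aLoop s p (List.range s.length)
      = (((List.range s.length).filter (fun i => pmatch (s ++ s) 0 p i)).head?).map
          (fun i => s.drop i ++ s.take i) := by
    rw [aLoop_eq_find s p hm (List.range s.length) (fun i hi => List.mem_range.mp hi),
        ← find?_eq_head?_filter]
    have hfun : (fun i => matchAt (s ++ s) p i) = (fun i => pmatch (s ++ s) 0 p i) :=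
      funext (fun i => matchAt_eq_pmatch (s ++ s) p i)
    rw [hfun]
  rw [hmain]
  unfold bSearch
  rcases bFilter_spec (s ++ s) p (List.range s.length) 0 with ⟨hnone, hfilt⟩ | hsome
  · rw [hnone, hfilt]
    rfl
  · rw [hsome]
    cases hf : (List.range s.length).filter (fun i => pmatch (s ++ s) 0 p i) with
    | nil => rfl
    | cons start rest =>
      have hmem : start ∈ (List.range s.length).filter (fun i => pmatch (s ++ s) 0 p i) := by
        rw [hf]; simp
      have hi : start < s.length := List.mem_range.mp (List.mem_of_mem_filter hmem)
      simp only [List.head?_cons, Option.map_some]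
      rw [PySem.List.slice_natCast_add, rot_eq_window s start (le_of_lt hi)]

-- ===== VERDICT (by name: the statement is the Claim_ definition above) =====
theorem cycle_with_pattern_py_spec : Claim_equal_cycle_with_pattern_py := by
  intro node_ids pattern _
  unfold Spec_cycle_with_pattern_py cycle_with_pattern_py cycle_with_pattern_py_alt
  simp only [List.map_id_fun', id_eq]
  by_cases hm : pattern.length ≤ node_ids.length
  · rw [if_neg (by omega)]
    rw [aLoop_eq_bSearch node_ids pattern hm]
    have hrev : node_ids.length = node_ids.reverse.length := by simp
    rw [hrev, aLoop_eq_bSearch node_ids.reverse pattern (by simpa using hm)]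
  · rw [if_pos (by omega)]
    rw [aLoop_none_of_long node_ids pattern (by omega) _ (fun i hi => List.mem_range.mp hi),
        aLoop_none_of_long node_ids.reverse pattern (by simpa using (by omega : node_ids.length < pattern.length)) _ (by simp)]
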